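-- pv_equiv track=rewrite | github.com/depromeet/algoStudy | medium/1902/190222/gyukebox.py | solve
-- ===== SOURCE A (Python) =====
-- def solve(n):
--     if n == 1:
--         return 'Richard'
--
--     bin_n = format(n, 'b')
--     exp = len(bin_n) - 1
--     mask = 2 ** exp - 1
--
--     moves = 0
--     if not n & mask:
--         moves = exp
--     else:
--         cnt = 0
--         idx = 0
--         for i in range(1, exp + 1):
--             if bin_n[i] == '1':
--                 cnt += 1
--                 idx = i
--         moves += (exp - idx + cnt)
--
--     return 'Louise' if moves % 2 else 'Richard'
-- ===== SOURCE B (Python) =====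
-- def solve(n):
--     bits = bin(n).count('1')
--     tz = (n & -n).bit_length() - 1
--     return 'Louise' if (bits - 1 + tz) % 2 else 'Richard'
-- ===== Notes on version B (the rewrite author's own statement) =====
-- stated objective: simpler
-- what changed: Replaces A's binary-string construction, power-of-two mask branch and per-bit index loop by the closed-form move count popcount(n)-1 + trailing_zeros(n) computed with int bit operations.
-- outside the precondition, e.g. on solve(-1): A returns 'Louise', B returns 'Richard'; on solve(0): A returns 'Richard', B returns 'Richard'
import Mathlib
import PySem

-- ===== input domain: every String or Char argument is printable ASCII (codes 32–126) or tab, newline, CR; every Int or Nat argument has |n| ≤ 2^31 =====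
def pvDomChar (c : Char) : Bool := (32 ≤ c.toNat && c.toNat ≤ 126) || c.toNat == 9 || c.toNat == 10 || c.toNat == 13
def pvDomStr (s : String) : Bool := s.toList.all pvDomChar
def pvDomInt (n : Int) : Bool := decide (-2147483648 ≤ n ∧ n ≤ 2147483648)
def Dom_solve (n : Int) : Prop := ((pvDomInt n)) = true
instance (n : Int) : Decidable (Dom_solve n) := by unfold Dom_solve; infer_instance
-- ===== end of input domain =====

-- B replaces A's binary-string scan and power-of-two branch by the closed-form
-- move count popcount(n)-1 + trailing_zeros(n) (simpler; equal values proved for n ≥ 1).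


-- ===== PORT A =====
-- the for-loop of A: for i in range(1, exp + 1): if bin_n[i] == '1': cnt += 1; idx = i
-- (index i is always in range here, so pyGetD is exact)
def solveLoop (binN : List Char) (exp : Int) : Int × Int :=
  (PySem.List.pyRange 1 (exp + 1)).foldl
    (fun (p : Int × Int) i =>
      if PySem.List.pyGetD binN i ' ' == '1' then (p.1 + 1, i) else p)
    (0, 0)

def solve (n : Int) : String :=
  if n == 1 then "Richard"
  else
    let binN : List Char := PySem.Int.toBinChars n          -- format(n, 'b')
    let exp : Int := (binN.length : Int) - 1
    let mask : Int := 2 ^ exp.toNat - 1                     -- 2 ** exp (exp ≥ 0 always: binN ≠ [])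
    let moves : Int :=
      if PySem.Int.band n mask == 0 then exp
      else
        let p := solveLoop binN exp
        exp - p.2 + p.1
    if PySem.Int.mod moves 2 ≠ 0 then "Louise" else "Richard"

-- ===== PORT B =====
def solve_alt (n : Int) : String :=
  let bits : Int := (PySem.Int.bitCount n : Int)                                 -- bin(n).count('1')
  let tz : Int := (PySem.Int.bitLength (PySem.Int.band n (-n)) : Int) - 1        -- (n & -n).bit_length() - 1
  if PySem.Int.mod (bits - 1 + tz) 2 ≠ 0 then "Louise" else "Richard"

-- ===== PRECONDITION & SPEC =====
-- Pre_ excludes n ≤ 0, on which A still returns: there A mixes the sign-magnitude binary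
-- string with a two's-complement mask, an accidental value outside the game's positive domain
-- (at n = 0 the two programs coincide only by accident).
def Pre_solve (n : Int) : Prop := 1 ≤ n
instance (n : Int) : Decidable (Pre_solve n) := by unfold Pre_solve; infer_instance
def pvWitness_solve : Int := 6

def Spec_solve (n : Int) (out : String) : Prop := out = solve_alt n
instance (n : Int) (out : String) : Decidable (Spec_solve n out) := by unfold Spec_solve; infer_instance

-- ===== CLAIM (what is proved, stated in full; the proofs are below) =====
def Claim_equal_solve : Prop := ∀ (n : Int), Dom_solve n → Pre_solve n → Spec_solve n (solve n)

-- ===== LEMMAS AND PROOFS =====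

-- trailing zeros of a positive natural number
def tzN : Nat → Nat
  | 0 => 0
  | m+1 => if (m+1) % 2 = 1 then 0 else tzN ((m+1)/2) + 1
  decreasing_by omega

theorem tzN_odd {m : Nat} (h : m % 2 = 1) : tzN m = 0 := by
  cases m with
  | zero => simp at h
  | succ k => rw [tzN]; simp [h]

theorem tzN_even {m : Nat} (h0 : 0 < m) (h : m % 2 = 0) : tzN m = tzN (m/2) + 1 := by
  cases m with
  | zero => omega
  | succ k => rw [tzN]; simp [h]

theorem land_dbl (a b u v : Nat) (hu : u ≤ 1) (hv : v ≤ 1) :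
    (2*a+u) &&& (2*b+v) = 2*(a&&&b) + (u &&& v) := by
  apply Nat.eq_of_testBit_eq; intro i
  rw [Nat.testBit_and]
  interval_cases u <;> interval_cases v <;>
  · cases i with
    | zero => simp [Nat.testBit_zero, Nat.mul_mod_right]
    | succ j => simp [Nat.testBit_succ, Nat.testBit_and, Nat.mul_add_div,
        Nat.mul_div_cancel_left _ (by norm_num : (0:Nat) < 2)]

-- Nat.toDigits: accumulator and fuel lemmas, and the binary recursion
theorem toDigitsCore_acc (f : Nat) : ∀ (n : Nat) (l : List Char),
    Nat.toDigitsCore 2 f n l = Nat.toDigitsCore 2 f n [] ++ l := by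
  induction f with
  | zero => intro n l; simp [Nat.toDigitsCore]
  | succ g ih =>
    intro n l
    simp only [Nat.toDigitsCore]
    by_cases h : n / 2 = 0
    · simp [h]
    · simp only [h, if_false]
      rw [ih (n/2) ((n % 2).digitChar :: l), ih (n/2) [(n % 2).digitChar]]
      simp

theorem toDigitsCore_fuel : ∀ (n f : Nat), n + 1 ≤ f →
    Nat.toDigitsCore 2 f n [] = Nat.toDigits 2 n := by
  intro n
  induction n using Nat.strong_induction_on with
  | _ n ih =>
    intro f hf
    match f with
    | g + 1 =>
      rw [Nat.toDigits]
      simp only [Nat.toDigitsCore]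
      by_cases h : n / 2 = 0
      · simp [h]
      · simp only [h, if_false]
        rw [toDigitsCore_acc g (n/2), toDigitsCore_acc n (n/2)]
        rw [ih (n/2) (by omega) g (by omega), ih (n/2) (by omega) n (by omega)]

theorem toDigits_rec (m : Nat) (h : 2 ≤ m) :
    Nat.toDigits 2 m = Nat.toDigits 2 (m/2) ++ [(m % 2).digitChar] := by
  rw [Nat.toDigits]
  simp only [Nat.toDigitsCore]
  have h2 : ¬ (m / 2 = 0) := by omega
  simp only [h2, if_false]
  rw [toDigitsCore_acc m (m/2), toDigitsCore_fuel (m/2) m (by omega)]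

theorem toDigits_len (m : Nat) (h : 1 ≤ m) :
    (Nat.toDigits 2 m).length = PySem.Int.bitLength (m : Int) := by
  induction m using Nat.strong_induction_on with
  | _ m ih =>
    by_cases h1 : m = 1
    · subst h1; decide
    · rw [toDigits_rec m (by omega), PySem.Int.bitLength_natCast (by omega)]
      simp [ih (m/2) (by omega) (by omega)]

theorem bitCount_pos (m : Nat) (h : 1 ≤ m) : 1 ≤ PySem.Int.bitCount (m : Int) := by
  induction m using Nat.strong_induction_on with
  | _ m ih =>
    by_cases h1 : m = 1
    · subst h1; decide
    · rw [PySem.Int.bitCount_natCast (by omega)]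
      rcases Nat.even_or_odd m with he | ho
      · have := ih (m/2) (by omega) (by omega); omega
      · have := Nat.odd_iff.mp ho; omega

theorem bitCount_pow (e : Nat) : PySem.Int.bitCount ((2^e : Nat) : Int) = 1 := by
  induction e with
  | zero => decide
  | succ d ih =>
    rw [PySem.Int.bitCount_natCast (by positivity)]
    have h1 : 2^(d+1) % 2 = 0 := by simp [Nat.pow_succ, Nat.mul_mod_left]
    have h2 : 2^(d+1) / 2 = 2^d := by rw [Nat.pow_succ]; omega
    rw [h1, h2, ih]

theorem tzN_pow (e : Nat) : tzN (2^e) = e := by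
  induction e with
  | zero => exact tzN_odd (by norm_num)
  | succ d ih =>
    have h1 : 2^(d+1) % 2 = 0 := by simp [Nat.pow_succ, Nat.mul_mod_left]
    have h2 : 2^(d+1) / 2 = 2^d := by rw [Nat.pow_succ]; omega
    rw [tzN_even (by positivity) h1, h2, ih]

theorem bitLength_pow (e : Nat) : PySem.Int.bitLength ((2^e : Nat) : Int) = e + 1 := by
  induction e with
  | zero => decide
  | succ d ih =>
    rw [PySem.Int.bitLength_natCast (by positivity)]
    have h2 : 2^(d+1) / 2 = 2^d := by rw [Nat.pow_succ]; omega
    rw [h2, ih]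

-- bitCount = 1 characterises exactly the powers of two 2^(bitLength - 1)
theorem bitCount_one_iff (m : Nat) (h : 1 ≤ m) :
    PySem.Int.bitCount (m : Int) = 1 ↔ m = 2 ^ (PySem.Int.bitLength (m : Int) - 1) := by
  induction m using Nat.strong_induction_on with
  | _ m ih =>
    by_cases h1 : m = 1
    · subst h1; decide
    · rw [PySem.Int.bitCount_natCast (by omega), PySem.Int.bitLength_natCast (by omega)]
      have hhalf : 1 ≤ m / 2 := by omega
      have hbl : 1 ≤ PySem.Int.bitLength ((m/2 : Nat) : Int) := by
        rw [← toDigits_len _ hhalf]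
        have : Nat.toDigits 2 (m/2) ≠ [] := by
          by_cases h2 : m/2 = 1
          · rw [h2]; decide
          · rw [toDigits_rec _ (by omega)]; simp
        cases hne : Nat.toDigits 2 (m/2) with
        | nil => exact absurd hne this
        | cons a l => simp
      rcases Nat.even_or_odd m with he | ho
      · have hm2 : m % 2 = 0 := Nat.even_iff.mp he
        rw [hm2]
        simp only [Nat.zero_add, Nat.add_sub_cancel]
        rw [ih (m/2) (by omega) hhalf]
        have hpow : 2 ^ (PySem.Int.bitLength ((m/2 : Nat) : Int))
            = 2 * 2 ^ (PySem.Int.bitLength ((m/2 : Nat) : Int) - 1) := by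
          conv_lhs => rw [show PySem.Int.bitLength ((m/2 : Nat) : Int)
            = (PySem.Int.bitLength ((m/2 : Nat) : Int) - 1) + 1 by omega]
          ring
        omega
      · have hm2 : m % 2 = 1 := Nat.odd_iff.mp ho
        rw [hm2]
        have hbc := bitCount_pos (m/2) hhalf
        constructor
        · intro he2; omega
        · intro he2
          exfalso
          simp only [Nat.add_sub_cancel] at he2
          have hb := hbl
          have : 2 ∣ 2 ^ (PySem.Int.bitLength ((m/2 : Nat) : Int)) :=
            dvd_pow_self 2 (by omega)
          omega

-- n & -n is the lowest set bit
theorem sub_land_lowbit (m : Nat) (h : 1 ≤ m) : m - (m &&& (m-1)) = 2 ^ tzN m := by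
  induction m using Nat.strong_induction_on with
  | _ m ih =>
    rcases Nat.even_or_odd m with he | ho
    · have hm2 : m % 2 = 0 := Nat.even_iff.mp he
      obtain ⟨k, hk⟩ : ∃ k, m = 2 * k := ⟨m/2, by omega⟩
      have hk1 : 1 ≤ k := by omega
      have hml : m - 1 = 2*(k-1) + 1 := by omega
      have : m &&& (m-1) = 2*(k &&& (k-1)) := by
        rw [hml, hk, show (2*k : Nat) = 2*k + 0 by ring,
            land_dbl k (k-1) 0 1 (by omega) (by omega)]
        simp
      rw [this, tzN_even (by omega) hm2, hk]
      have hhalf : 2*k/2 = k := by omega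
      rw [hhalf]
      have hland : k &&& (k-1) ≤ k := Nat.and_le_left
      have := ih k (by omega) hk1
      rw [pow_succ]
      omega
    · have hm2 : m % 2 = 1 := Nat.odd_iff.mp ho
      obtain ⟨k, hk⟩ : ∃ k, m = 2 * k + 1 := ⟨m/2, by omega⟩
      have hml : m - 1 = 2*k + 0 := by omega
      have : m &&& (m-1) = 2*k := by
        rw [hml, hk, land_dbl k k 1 0 (by omega) (by omega)]
        simp [Nat.and_self]
      rw [this, tzN_odd hm2]
      omega

theorem band_lowbit (m : Nat) (h : 1 ≤ m) :
    PySem.Int.band (m : Int) (-(m : Int)) = ((2 ^ tzN m : Nat) : Int) := by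
  rw [PySem.Int.band]
  have h0 : (0 : Int) ≤ (m : Int) := by positivity
  have h1 : ¬ ((0:Int) ≤ -(m:Int)) := by omega
  simp only [h0, if_true, h1, if_false]
  have h2 : (-(-(m:Int)) - 1).toNat = m - 1 := by omega
  have h3 : ((m:Int)).toNat = m := by omega
  rw [h2, h3, sub_land_lowbit m h]

-- the loop of A, as a function of the binary string
def loopA (bs : List Char) : Int × Int :=
  (PySem.List.pyRange 1 (bs.length : Int)).foldl
    (fun (p : Int × Int) i =>
      if PySem.List.pyGetD bs i ' ' == '1' then (p.1 + 1, i) else p)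
    (0, 0)

theorem solveLoop_eq_loopA (bs : List Char) :
    solveLoop bs ((bs.length : Int) - 1) = loopA bs := by
  unfold solveLoop loopA
  rw [sub_add_cancel]

theorem loopA_append (bs : List Char) (c : Char) (h : 1 ≤ bs.length) :
    loopA (bs ++ [c]) =
      if c = '1' then ((loopA bs).1 + 1, (bs.length : Int)) else loopA bs := by
  unfold loopA
  have hlen : ((bs ++ [c]).length : Int) = (bs.length : Int) + 1 := by simp
  rw [hlen, PySem.List.pyRange_one_succ_right (by exact_mod_cast h), List.foldl_append]
  have hcongr : ∀ (acc : Int × Int), ∀ x ∈ PySem.List.pyRange 1 (bs.length : Int),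
      (if PySem.List.pyGetD (bs ++ [c]) x ' ' == '1' then (acc.1 + 1, x) else acc)
      = (if PySem.List.pyGetD bs x ' ' == '1' then (acc.1 + 1, x) else acc) := by
    intro acc x hx
    rw [PySem.List.mem_pyRange_one] at hx
    have hget : PySem.List.pyGetD (bs ++ [c]) x ' ' = PySem.List.pyGetD bs x ' ' := by
      rw [PySem.List.pyGetD_eq_getElem (bs ++ [c]) ' ' (by omega) (by simp; omega),
          PySem.List.pyGetD_eq_getElem bs ' ' (by omega) (by exact_mod_cast hx.2)]
      rw [List.getElem_append_left (by omega)]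
    rw [hget]
  rw [PySem.List.foldl_congr_mem _ _ _ _ hcongr]
  have hlast : PySem.List.pyGetD (bs ++ [c]) (bs.length : Int) ' ' = c := by
    rw [PySem.List.pyGetD_eq_getElem (bs ++ [c]) ' ' (by positivity) (by simp)]
    simp
  simp only [List.foldl_cons, List.foldl_nil, hlast]
  by_cases hc : c = '1' <;> simp [hc]

-- full characterisation of A's loop on the binary string of m
theorem loopA_toDigits (m : Nat) (h : 1 ≤ m) :
    loopA (Nat.toDigits 2 m) =
      ((PySem.Int.bitCount (m : Int) : Int) - 1,
       if PySem.Int.bitCount (m : Int) = 1 then 0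
       else ((Nat.toDigits 2 m).length : Int) - 1 - (tzN m : Int)) := by
  induction m using Nat.strong_induction_on with
  | _ m ih =>
    by_cases h1 : m = 1
    · subst h1
      unfold loopA
      rw [show Nat.toDigits 2 1 = ['1'] from by decide,
          show PySem.Int.bitCount ((1 : Nat) : Int) = 1 from by decide]
      norm_num [PySem.List.pyRange_one_eq_nil]
    · have hhalf : 1 ≤ m / 2 := by omega
      have hlenpos : 1 ≤ (Nat.toDigits 2 (m/2)).length := by
        by_cases h2 : m/2 = 1
        · rw [h2]; decide
        · rw [toDigits_rec _ (by omega)]; simp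
      rw [toDigits_rec m (by omega), loopA_append _ _ hlenpos,
          ih (m/2) (by omega) hhalf]
      rcases Nat.even_or_odd m with he | ho
      · have hm2 : m % 2 = 0 := Nat.even_iff.mp he
        rw [hm2]
        have hc : Nat.digitChar 0 ≠ '1' := by decide
        rw [if_neg hc]
        rw [PySem.Int.bitCount_natCast (show 0 < m by omega), hm2, Nat.zero_add]
        rw [tzN_even (by omega) hm2]
        simp only [List.length_append, List.length_cons, List.length_nil, Prod.mk.injEq,
          true_and]
        by_cases hone : PySem.Int.bitCount ((m/2 : Nat) : Int) = 1
        · rw [if_pos hone, if_pos hone]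
        · rw [if_neg hone, if_neg hone]
          push_cast
          ring
      · have hm2 : m % 2 = 1 := Nat.odd_iff.mp ho
        rw [hm2]
        have hc : Nat.digitChar 1 = '1' := by decide
        rw [if_pos hc]
        rw [PySem.Int.bitCount_natCast (show 0 < m by omega), hm2]
        have hbc := bitCount_pos (m/2) hhalf
        have hne : ¬ (1 + PySem.Int.bitCount ((m/2 : Nat) : Int) = 1) := by omega
        rw [if_neg hne, tzN_odd hm2]
        simp only [List.length_append, List.length_cons, List.length_nil, Prod.mk.injEq]
        push_cast
        constructor <;> ring

-- A's moves equal B's moves, for every positive m (main arithmetic core)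
theorem moves_eq (m : Nat) (h2 : 2 ≤ m)
    (binN : List Char) (hbinN : binN = PySem.Int.toBinChars (m : Int))
    (exp : Int) (hexp0 : exp = (binN.length : Int) - 1)
    (mask : Int) (hmask0 : mask = 2 ^ exp.toNat - 1) :
    (if PySem.Int.band (m : Int) mask == 0 then exp
     else exp - (solveLoop binN exp).2 + (solveLoop binN exp).1)
    = (PySem.Int.bitCount (m : Int) : Int) - 1
      + ((PySem.Int.bitLength (PySem.Int.band (m : Int) (-(m : Int))) : Int) - 1) := by
  rw [hexp0, solveLoop_eq_loopA]
  have hbin : binN = Nat.toDigits 2 m := by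
    rw [hbinN, PySem.Int.toBinChars]
    have : ¬ ((m : Int) < 0) := by omega
    simp [this]
  set L : Nat := PySem.Int.bitLength (m : Int) with hL
  have hlen : binN.length = L := by rw [hbin]; exact toDigits_len m (by omega)
  have hLpos : 1 ≤ L := by
    by_contra hc
    have h0 : L = 0 := by omega
    have hlt := PySem.Int.lt_two_pow_bitLength (m : Int)
    rw [← hL, h0] at hlt
    simp [Int.natAbs_natCast] at hlt
    omega
  have hexpt : exp.toNat = L - 1 := by rw [hexp0, hlen]; omega
  have hmask : mask = ((2 ^ (L-1) - 1 : Nat) : Int) := by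
    rw [hmask0, hexpt]
    have : 1 ≤ 2 ^ (L-1) := Nat.one_le_two_pow
    push_cast [this]
    ring
  have hband : PySem.Int.band (m : Int) mask = ((m % 2 ^ (L-1) : Nat) : Int) := by
    rw [hmask, PySem.Int.band_natCast, Nat.and_two_pow_sub_one_eq_mod]
  have hlow : 2 ^ (L - 1) ≤ m := by
    have := PySem.Int.two_pow_bitLength_le (m : Int) (by positivity)
    simpa [← hL] using this
  have hhigh : m < 2 ^ L := by
    have := PySem.Int.lt_two_pow_bitLength (m : Int)
    simpa [← hL] using this
  by_cases hz : m % 2 ^ (L-1) = 0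
  · -- power-of-two branch
    have hmeq : m = 2 ^ (L-1) := by
      obtain ⟨q, hq⟩ := Nat.dvd_of_mod_eq_zero hz
      have hpow : 2 ^ L = 2 * 2 ^ (L-1) := by
        conv_lhs => rw [show L = (L-1) + 1 by omega]
        ring
      have hp1 : 1 ≤ 2 ^ (L-1) := Nat.one_le_two_pow
      have hq2 : q < 2 := by
        by_contra hc
        have : 2 * 2 ^ (L-1) ≤ 2 ^ (L-1) * q := by
          calc 2 * 2 ^ (L-1) = 2 ^ (L-1) * 2 := by ring
          _ ≤ 2 ^ (L-1) * q := Nat.mul_le_mul_left _ (by omega)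
        omega
      have hq3 : 1 ≤ q := by
        by_contra hc
        have hq0 : q = 0 := by omega
        rw [hq0, Nat.mul_zero] at hq
        omega
      have hq1 : q = 1 := by omega
      rw [hq1, Nat.mul_one] at hq
      omega
    have hcond : (PySem.Int.band (m : Int) mask == 0) = true := by
      rw [hband, hz]; decide
    rw [if_pos hcond, hlen]
    rw [hmeq, bitCount_pow, band_lowbit _ Nat.one_le_two_pow, tzN_pow, bitLength_pow]
    push_cast
    omega
  · -- general branch
    have hcond : ¬ ((PySem.Int.band (m : Int) mask == 0) = true) := by
      rw [hband]
      simp only [beq_iff_eq]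
      exact_mod_cast hz
    rw [if_neg hcond]
    have hmne : m ≠ 2 ^ (L-1) := by
      intro hc; apply hz; rw [hc]; simp
    have hbc : PySem.Int.bitCount (m : Int) ≠ 1 := by
      intro hc
      exact hmne ((bitCount_one_iff m (by omega)).mp hc)
    rw [hbin, loopA_toDigits m (by omega), if_neg hbc]
    rw [band_lowbit m (by omega), bitLength_pow]
    push_cast
    ring

-- ===== VERDICT (by name: the statement is the Claim_ definition above) =====
theorem solve_spec : Claim_equal_solve := by
  intro n hdom hpre
  unfold Spec_solve
  have hpre' : (1 : Int) ≤ n := hpre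
  obtain ⟨m, hm⟩ : ∃ m : Nat, n = (m : Int) := ⟨n.toNat, by omega⟩
  subst hm
  have hm1 : 1 ≤ m := by exact_mod_cast hpre'
  by_cases h1 : m = 1
  · subst h1; decide
  · have h2 : 2 ≤ m := by omega
    have hne : ¬ (((m : Int) == 1) = true) := by
      simp only [beq_iff_eq]
      exact_mod_cast h1
    have hA : solve (m : Int)
        = if PySem.Int.mod (if PySem.Int.band (m : Int)
                (2 ^ ((((PySem.Int.toBinChars (m : Int)).length : Int) - 1).toNat) - 1) == 0
              then ((PySem.Int.toBinChars (m : Int)).length : Int) - 1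
              else ((PySem.Int.toBinChars (m : Int)).length : Int) - 1
                   - (solveLoop (PySem.Int.toBinChars (m : Int))
                       (((PySem.Int.toBinChars (m : Int)).length : Int) - 1)).2
                   + (solveLoop (PySem.Int.toBinChars (m : Int))
                       (((PySem.Int.toBinChars (m : Int)).length : Int) - 1)).1) 2 ≠ 0
          then "Louise" else "Richard" := by
      unfold solve
      rw [if_neg hne]
    have hB : solve_alt (m : Int)
        = if PySem.Int.mod ((PySem.Int.bitCount (m : Int) : Int) - 1
              + ((PySem.Int.bitLength (PySem.Int.band (m : Int) (-(m : Int))) : Int) - 1)) 2 ≠ 0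
          then "Louise" else "Richard" := rfl
    rw [hA, hB, moves_eq m h2 _ rfl _ rfl _ rfl]
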